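-- pv_equiv track=rewrite | github.com/rjames187/Leetcode-solutions | basicRecursionProblems.py | count8
-- ===== SOURCE A (Python) =====
-- def count8(n):
--     if len(str(n)) == 0:
--         return 0
--     elif len(str(n)) == 1:
--         if n == 8:
--             return 1
--         else:
--             return 0
--     elif n % 10 == 8:
--         if (n // 10) % 10 == 8:
--             return 2 + count8(n // 10)
--         else:
--             return 1 + count8(n // 10)
--     else:
--         return count8(n // 10)
-- ===== SOURCE B (Python) =====
-- def count8(n):
--     digits = []
--     while n > 9:
--         digits.append(n % 10)
--         n //= 10
--     digits.append(n)
--     eights = digits.count(8)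
--     pairs = sum(1 for a, b in zip(digits, digits[1:]) if a == 8 and b == 8)
--     return eights + pairs
-- ===== Notes on version B (the rewrite author's own statement) =====
-- stated objective: alternative
-- what changed: Replaces the string-length-guided recursion by a two-phase iterative program: a while loop peels the digits into a list arithmetically, then the result is computed as digits.count(8) plus the number of adjacent (8,8) pairs.
import Mathlib
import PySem

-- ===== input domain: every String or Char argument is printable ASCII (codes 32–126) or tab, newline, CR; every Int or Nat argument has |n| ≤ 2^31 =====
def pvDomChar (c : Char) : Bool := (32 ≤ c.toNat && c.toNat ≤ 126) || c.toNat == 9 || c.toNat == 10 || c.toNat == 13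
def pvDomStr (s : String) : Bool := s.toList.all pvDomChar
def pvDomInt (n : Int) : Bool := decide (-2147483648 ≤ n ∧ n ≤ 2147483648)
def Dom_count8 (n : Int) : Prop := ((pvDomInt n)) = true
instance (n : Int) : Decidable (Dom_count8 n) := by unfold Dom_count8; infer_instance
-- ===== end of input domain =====

-- B replaces A's digit-at-a-time recursion by an iterative peel-then-count program; return values agree on all n ≥ 0 (A raises RecursionError on negative n).

-- ===== PORT A =====
-- fuel = n.toNat + 1 only makes the recursion total; on Pre_ (0 ≤ n) it never runs out.
-- len(str(n)) is ported as (PySem.Int.toChars n).length, exact via PySem.Int.toList_toStr.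
def count8Go : Nat → Int → Int
  | 0, _ => 0
  | fuel + 1, n =>
    if (PySem.Int.toChars n).length = 0 then 0
    else if (PySem.Int.toChars n).length = 1 then
      (if n = 8 then 1 else 0)
    else if PySem.Int.mod n 10 = 8 then
      (if PySem.Int.mod (PySem.Int.floordiv n 10) 10 = 8 then
        2 + count8Go fuel (PySem.Int.floordiv n 10)
      else
        1 + count8Go fuel (PySem.Int.floordiv n 10))
    else count8Go fuel (PySem.Int.floordiv n 10)

def count8 (n : Int) : Int := count8Go (n.toNat + 1) n

-- ===== PORT B =====
-- the while loop of Source B: peel digits (least significant first) while n > 9, then append the last n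
def peelDigits (n : Int) : List Int :=
  if 9 < n then PySem.Int.mod n 10 :: peelDigits (PySem.Int.floordiv n 10)
  else [n]
termination_by n.toNat
decreasing_by
  rename_i h
  rw [PySem.Int.floordiv_eq_ediv_of_pos (by omega : (0:Int) < 10)]
  omega

def count8_alt (n : Int) : Int :=
  let digits := peelDigits n
  let eights : Int := (PySem.List.count digits 8 : Nat)
  let pairs : Int := ((digits.zip (digits.drop 1)).countP (fun p => p.1 == 8 && p.2 == 8) : Nat)
  eights + pairs

-- ===== PRECONDITION & SPEC =====
-- Pre_ excludes exactly the negative inputs, on which A's recursion never reaches a one-digit string and raises RecursionError.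
def Pre_count8 (n : Int) : Prop := 0 ≤ n
instance (n : Int) : Decidable (Pre_count8 n) := by unfold Pre_count8; infer_instance
def pvWitness_count8 : Int := (88)

def Spec_count8 (n : Int) (out : Int) : Prop := out = count8_alt n
instance (n : Int) (out : Int) : Decidable (Spec_count8 n out) := by unfold Spec_count8; infer_instance

-- ===== CLAIM (what is proved, stated in full; the proofs are below) =====
def Claim_equal_count8 : Prop := ∀ (n : Int), Dom_count8 n → Pre_count8 n → Spec_count8 n (count8 n)

-- ===== LEMMAS AND PROOFS =====

-- B's total score of a digit list (what count8_alt computes on peelDigits n)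
def score (l : List Int) : Int :=
  (PySem.List.count l 8 : Nat) + ((l.zip (l.drop 1)).countP (fun p => p.1 == 8 && p.2 == 8) : Nat)

theorem count8_alt_eq_score (n : Int) : count8_alt n = score (peelDigits n) := rfl

theorem toDigitsCore_length_ge (f : Nat) : ∀ (n : Nat) (l : List Char),
    l.length + 1 ≤ (Nat.toDigitsCore 10 (f + 1) n l).length := by
  induction f with
  | zero =>
    intro n l
    simp only [Nat.toDigitsCore]
    split <;> simp [Nat.toDigitsCore]
  | succ f ih =>
    intro n l
    simp only [Nat.toDigitsCore]
    split
    · simp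
    · exact le_trans (by simp) (ih (n / 10) (Nat.digitChar (n % 10) :: l))

theorem toChars_len_small {n : Int} (h0 : 0 ≤ n) (h9 : n ≤ 9) :
    (PySem.Int.toChars n).length = 1 := by
  have hlt : ¬ n < 0 := by omega
  have ht : n.toNat < 10 := by omega
  simp [PySem.Int.toChars, if_neg hlt, Nat.toDigits, Nat.toDigitsCore, Nat.div_eq_of_lt ht]

theorem toChars_len_big {n : Int} (h : 10 ≤ n) : 2 ≤ (PySem.Int.toChars n).length := by
  have hlt : ¬ n < 0 := by omega
  have ht : 10 ≤ n.toNat := by omega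
  simp only [PySem.Int.toChars, if_neg hlt, Nat.toDigits]
  obtain ⟨m, hm⟩ : ∃ m, n.toNat = m + 1 := ⟨n.toNat - 1, by omega⟩
  rw [hm]
  have hdiv : ¬ (m + 1) / 10 = 0 := by
    intro hc; have := Nat.div_eq_zero_iff.mp hc; omega
  simp only [Nat.toDigitsCore, if_neg hdiv]
  obtain ⟨f, hf⟩ : ∃ f, m = f + 1 := ⟨m - 1, by omega⟩
  rw [hf]
  exact le_trans (by norm_num) (toDigitsCore_length_ge (f + 1) ((f + 1 + 1) / 10) _)

theorem peel_small {n : Int} (h : n ≤ 9) : peelDigits n = [n] := by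
  unfold peelDigits
  rw [if_neg (by omega)]

theorem peel_big {n : Int} (h : 10 ≤ n) :
    peelDigits n = n % 10 :: peelDigits (n / 10) := by
  rw [peelDigits, if_pos (by omega : 9 < n),
    PySem.Int.mod_eq_emod_of_pos (by omega : (0:Int) < 10),
    PySem.Int.floordiv_eq_ediv_of_pos (by omega : (0:Int) < 10)]

theorem peel_head {n : Int} (h : 0 ≤ n) :
    ∃ rest, peelDigits n = n % 10 :: rest := by
  by_cases h10 : 10 ≤ n
  · exact ⟨peelDigits (n / 10), peel_big h10⟩
  · refine ⟨[], ?_⟩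
    rw [peel_small (by omega), Int.emod_eq_of_lt h (by omega)]

theorem score_cons_cons (a b : Int) (rest : List Int) :
    score (a :: b :: rest) =
      (if a = 8 then (if b = 8 then 2 else 1) else 0) + score (b :: rest) := by
  simp only [score, PySem.List.count_eq, List.count_cons, List.drop_succ_cons,
    List.drop_zero, List.zip_cons_cons, List.countP_cons]
  by_cases ha : a = 8 <;> by_cases hb : b = 8 <;>
    simp [ha, hb] <;> omega

theorem score_single (a : Int) : score [a] = if a = 8 then 1 else 0 := by
  by_cases ha : a = 8 <;> simp [score, PySem.List.count_eq, ha]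

theorem count8Go_eq_score : ∀ (f : Nat) (n : Int), 0 ≤ n → n.toNat < f →
    count8Go f n = score (peelDigits n) := by
  intro f
  induction f with
  | zero => intro n _ hf; omega
  | succ f ih =>
    intro n h0 hf
    by_cases h9 : n ≤ 9
    · rw [count8Go, if_neg (by rw [toChars_len_small h0 h9]; omega),
        if_pos (toChars_len_small h0 h9), peel_small h9, score_single]
    · have h10 : 10 ≤ n := by omega
      have hq0 : 0 ≤ n / 10 := by positivity
      have hqf : (n / 10).toNat < f := by omega
      have hm : PySem.Int.mod n 10 = n % 10 :=
        PySem.Int.mod_eq_emod_of_pos (by omega)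
      have hd : PySem.Int.floordiv n 10 = n / 10 :=
        PySem.Int.floordiv_eq_ediv_of_pos (by omega)
      obtain ⟨rest, hrest⟩ := peel_head hq0
      have hmq : PySem.Int.mod (n / 10) 10 = (n / 10) % 10 :=
        PySem.Int.mod_eq_emod_of_pos (by omega)
      rw [count8Go, if_neg (by have := toChars_len_big h10; omega),
        if_neg (by have := toChars_len_big h10; omega), hm, hd, hmq,
        peel_big h10, hrest, score_cons_cons, ← hrest, ih (n / 10) hq0 hqf]
      by_cases hn8 : n % 10 = 8 <;> by_cases hq8 : (n / 10) % 10 = 8 <;>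
        simp [hn8, hq8] <;> omega

-- ===== VERDICT (by name: the statement is the Claim_ definition above) =====
theorem count8_spec : Claim_equal_count8 := by
  intro n _ hpre
  unfold Spec_count8 count8
  rw [count8_alt_eq_score]
  exact count8Go_eq_score (n.toNat + 1) n hpre (by omega)
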